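-- pv_equiv track=rewrite | github.com/ankurdivekar/squarepair | src/sort_overlapping_lists.py | sort_by_greedy_best_start
-- ===== SOURCE A (Python) =====
-- from typing import List, Tuple
--
-- def count_common_pairs(list1: List[Tuple[int, int]], list2: List[Tuple[int, int]]) -> int:
--     """
--     Count the number of common pairs between two lists.
--     Considers (a, b) and (b, a) as the same pair.
--
--     Parameters
--     ----------
--     list1, list2 : List of tuples
--         Lists of number pairs to compare
--
--     Returns
--     -------
--     int
--         Number of common pairs
--
--     Examples
--     --------
--     >>> count_common_pairs([(1, 2), (3, 4)], [(2, 1), (5, 6)])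
--     1  # (1,2) matches (2,1)
--     """
--     # Normalize pairs so (a, b) and (b, a) are treated the same
--     set1 = {tuple(sorted(pair)) for pair in list1}
--     set2 = {tuple(sorted(pair)) for pair in list2}
--     return len(set1 & set2)
--
-- def calculate_total_overlap(lists: List[List[Tuple[int, int]]]) -> int:
--     """
--     Calculate total overlap between consecutive lists.
--
--     Parameters
--     ----------
--     lists : List of lists of tuples
--         Ordered sequence of pair lists
--
--     Returns
--     -------
--     int
--         Total number of common pairs across all consecutive pairs
--     """
--     total = 0
--     for i in range(len(lists) - 1):
--         total += count_common_pairs(lists[i], lists[i + 1])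
--     return total
--
-- def sort_by_greedy_best_start(lists: List[List[Tuple[int, int]]]) -> List[List[Tuple[int, int]]]:
--     """
--     Try greedy algorithm starting from each list, return the best result.
--
--     More thorough than simple greedy, still fast for moderate sizes (< 1000 lists).
--
--     Parameters
--     ----------
--     lists : List of lists of tuples
--         Lists to sort
--
--     Returns
--     -------
--     List of lists
--         Best sorted sequence found
--     """
--     if len(lists) <= 1:
--         return lists.copy()
--
--     best_result = None
--     best_overlap = -1
--
--     # Try starting from each list
--     for start_idx in range(len(lists)):
--         result = [lists[start_idx]]
--         remaining = set(range(len(lists)))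
--         remaining.remove(start_idx)
--
--         while remaining:
--             current = result[-1]
--             best_next = None
--             best_next_overlap = -1
--
--             for idx in remaining:
--                 overlap = count_common_pairs(current, lists[idx])
--                 if overlap > best_next_overlap:
--                     best_next_overlap = overlap
--                     best_next = idx
--
--             result.append(lists[best_next])
--             remaining.remove(best_next)
--
--         total_overlap = calculate_total_overlap(result)
--         if total_overlap > best_overlap:
--             best_overlap = total_overlap
--             best_result = result
--
--     return best_result
-- ===== SOURCE B (Python) =====
-- from typing import List, Tuple
--
-- def sort_by_greedy_best_start(lists: List[List[Tuple[int, int]]]) -> List[List[Tuple[int, int]]]: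
--     """Best-start greedy chaining, but driven by precomputed ranking tables:
--     each node's candidate successors are sorted once (overlap descending,
--     index ascending, folded into the single integer key j - n*overlap), and
--     every greedy step just takes the first not-yet-used entry of the current
--     node's ranking, tracked by a used-flags array."""
--     n = len(lists)
--     if n <= 1:
--         return lists.copy()
--     sets = [frozenset(p if p[0] <= p[1] else (p[1], p[0]) for p in lst) for lst in lists]
--     ov = [[len(s & t) for t in sets] for s in sets]
--     # rank each node's successors once; key j - n*ov encodes (overlap desc, index asc)
--     ranked = [sorted(range(n), key=lambda j: j - n * row[j]) for row in ov]
--     best_chain, best_score = None, -1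
--     for start in range(n):
--         used = [False] * n
--         used[start] = True
--         chain, last, score = [start], start, 0
--         for _ in range(n - 1):
--             for j in ranked[last]:
--                 if not used[j]:
--                     break
--             used[j] = True
--             chain.append(j)
--             score += ov[last][j]
--             last = j
--         if score > best_score:
--             best_score, best_chain = score, chain
--     return [lists[i] for i in best_chain]
-- ===== Notes on version B (the rewrite author's own statement) =====
-- stated objective: faster
-- what changed: B precomputes the overlap matrix and, per node, a successor ranking sorted once by (overlap desc, index asc); each greedy step then just takes the first not-yet-used entry of the current node's ranking via a used-flags array, instead of A recomputing set intersections in an argmax scan over the remaining set at every step and re-summing the total overlap per start.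
import Mathlib
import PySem

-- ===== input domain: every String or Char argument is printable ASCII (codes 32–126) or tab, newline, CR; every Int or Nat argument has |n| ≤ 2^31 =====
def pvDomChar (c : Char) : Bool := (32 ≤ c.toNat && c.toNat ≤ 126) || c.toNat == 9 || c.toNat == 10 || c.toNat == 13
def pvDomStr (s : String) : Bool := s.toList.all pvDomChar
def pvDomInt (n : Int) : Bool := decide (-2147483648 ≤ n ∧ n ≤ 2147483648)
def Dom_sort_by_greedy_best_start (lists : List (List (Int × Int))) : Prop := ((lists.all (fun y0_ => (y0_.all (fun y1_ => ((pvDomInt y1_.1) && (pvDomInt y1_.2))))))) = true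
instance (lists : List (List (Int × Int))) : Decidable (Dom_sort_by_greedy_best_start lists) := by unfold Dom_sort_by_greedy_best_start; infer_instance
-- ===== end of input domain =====

-- B replaces A's per-step argmax scans (each recomputing set intersections) by a precomputed
-- overlap matrix and per-node successor rankings sorted once; each greedy step takes the first
-- not-yet-used entry of the current node's ranking, tracked by a used-flags array (objective: faster).
-- A's iteration 'for idx in remaining' over a Python set of the indices 0..n-1 is modelled as
-- ascending order, which is exactly CPython's iteration order for such a set.

-- ===== PORT A =====
-- tuple(sorted(pair)) for an int pair
def pvNormA (p : Int × Int) : Int × Int := if p.1 ≤ p.2 then (p.1, p.2) else (p.2, p.1)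

def count_common_pairs (list1 list2 : List (Int × Int)) : Int :=
  let set1 := PySem.Set.ofList (list1.map pvNormA)
  let set2 := PySem.Set.ofList (list2.map pvNormA)
  PySem.Set.len (PySem.Set.inter set1 set2)

def calculate_total_overlap (lists : List (List (Int × Int))) : Int :=
  (PySem.List.pyRange 0 ((lists.length : Int) - 1)).foldl
    (fun total i => total + count_common_pairs (PySem.List.pyGetD lists i [])
                                               (PySem.List.pyGetD lists (i + 1) [])) 0

-- the 'while remaining:' loop; fuel is only a totality guard (each pass removes one index)
def pvGreedyA (lists : List (List (Int × Int))) :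
    Nat → List (List (Int × Int)) → List Int → List (List (Int × Int))
  | 0, result, _ => result
  | fuel + 1, result, rem =>
    if rem.isEmpty then result else
      let current := PySem.List.pyGetD result (-1) []
      let best := rem.foldl (fun (st : Option Int × Int) idx =>
          let overlap := count_common_pairs current (PySem.List.pyGetD lists idx [])
          if st.2 < overlap then (some idx, overlap) else st) (none, -1)
      match best.1 with
      | none => result   -- unreachable when rem ≠ [] (Python would raise on lists[None])
      | some b => pvGreedyA lists fuel (result ++ [PySem.List.pyGetD lists b []]) (rem.erase b)

def sort_by_greedy_best_start (lists : List (List (Int × Int))) : List (List (Int × Int)) :=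
  if lists.length ≤ 1 then lists else
    let best := (PySem.List.pyRange 0 (lists.length : Int)).foldl
      (fun (st : Option (List (List (Int × Int))) × Int) start_idx =>
        let result := pvGreedyA lists lists.length [PySem.List.pyGetD lists start_idx []]
          ((PySem.List.pyRange 0 (lists.length : Int)).erase start_idx)
        let total_overlap := calculate_total_overlap result
        if st.2 < total_overlap then (some result, total_overlap) else st) (none, -1)
    best.1.getD []

-- ===== PORT B =====
def pvNormB (p : Int × Int) : Int × Int := if p.1 ≤ p.2 then p else (p.2, p.1)

-- one greedy step of B: first not-yet-used entry of the current node's ranking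
-- (state = (chain, last, score, used))
def pvStepB (ov ranked : List (List Int)) (st : List Int × Int × Int × List Bool) :
    List Int × Int × Int × List Bool :=
  match (PySem.List.pyGetD ranked st.2.1 []).find?
      (fun j => !(PySem.List.pyGetD st.2.2.2 j true)) with
  | none => st   -- unreachable: some index is always unused
  | some j =>
      (st.1 ++ [j], j,
       st.2.2.1 + PySem.List.pyGetD (PySem.List.pyGetD ov st.2.1 []) j 0,
       PySem.List.pySetD st.2.2.2 j true)

-- 'for _ in range(n - 1)'
def pvGreedyB (ov ranked : List (List Int)) :
    Nat → (List Int × Int × Int × List Bool) → List Int × Int × Int × List Bool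
  | 0, st => st
  | k + 1, st => pvGreedyB ov ranked k (pvStepB ov ranked st)

def sort_by_greedy_best_start_alt (lists : List (List (Int × Int))) : List (List (Int × Int)) :=
  let n := lists.length
  if n ≤ 1 then lists else
    let sets := lists.map (fun lst => PySem.Set.ofList (lst.map pvNormB))
    let ov := sets.map (fun s => sets.map (fun t => PySem.Set.len (PySem.Set.inter s t)))
    let ranked := ov.map (fun row =>
      PySem.List.sorted (PySem.List.pyRange 0 (n : Int))
        (fun j => j - (n : Int) * PySem.List.pyGetD row j 0))
    let best := (PySem.List.pyRange 0 (n : Int)).foldl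
      (fun (st : Option (List Int) × Int) start =>
        let used := PySem.List.pySetD (List.replicate n false) start true
        let res := pvGreedyB ov ranked (n - 1) ([start], start, 0, used)
        if st.2 < res.2.2.1 then (some res.1, res.2.2.1) else st) (none, -1)
    (best.1.getD []).map (fun i => PySem.List.pyGetD lists i [])

-- ===== PRECONDITION & SPEC =====
def Spec_sort_by_greedy_best_start (lists : List (List (Int × Int))) (out : List (List (Int × Int))) : Prop := out = sort_by_greedy_best_start_alt lists
instance (lists : List (List (Int × Int))) (out : List (List (Int × Int))) : Decidable (Spec_sort_by_greedy_best_start lists out) := by unfold Spec_sort_by_greedy_best_start; infer_instance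

-- ===== CLAIM (what is proved, stated in full; the proofs are below) =====
def Claim_equal_sort_by_greedy_best_start : Prop := ∀ (lists : List (List (Int × Int))), Dom_sort_by_greedy_best_start lists → Spec_sort_by_greedy_best_start lists (sort_by_greedy_best_start lists)

-- ===== LEMMAS AND PROOFS =====

-- shorthand for lists[i] (in-range use only)
def pvL (lists : List (List (Int × Int))) (i : Int) : List (Int × Int) :=
  PySem.List.pyGetD lists i []

-- the overlap matrix B builds
def pvOv (lists : List (List (Int × Int))) : List (List Int) :=
  (lists.map (fun lst => PySem.Set.ofList (lst.map pvNormB))).map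
    (fun s => (lists.map (fun lst => PySem.Set.ofList (lst.map pvNormB))).map
      (fun t => PySem.Set.len (PySem.Set.inter s t)))

-- the ranking tables B builds
def pvRanked (lists : List (List (Int × Int))) : List (List Int) :=
  (pvOv lists).map (fun row =>
    PySem.List.sorted (PySem.List.pyRange 0 (lists.length : Int))
      (fun j => j - (lists.length : Int) * PySem.List.pyGetD row j 0))

-- matrix row of the current node, and its overlap function
def pvF (lists : List (List (Int × Int))) (i j : Int) : Int :=
  PySem.List.pyGetD (PySem.List.pyGetD (pvOv lists) i []) j 0

-- sum of consecutive overlaps along an index chain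
def pvPairSum (lists : List (List (Int × Int))) : List Int → Int
  | a :: b :: t => count_common_pairs (pvL lists a) (pvL lists b) + pvPairSum lists (b :: t)
  | _ => 0

lemma pvNorm_funeq : pvNormB = pvNormA := by
  funext p; cases p; simp [pvNormA, pvNormB]

lemma pvCC_nonneg (l1 l2 : List (Int × Int)) : 0 ≤ count_common_pairs l1 l2 := by
  simp [count_common_pairs, PySem.Set.len]

lemma pvOv_entry (lists : List (List (Int × Int))) (i j : Int)
    (hi0 : 0 ≤ i) (hi : i < (lists.length : Int)) (hj0 : 0 ≤ j) (hj : j < (lists.length : Int)) :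
    pvF lists i j = count_common_pairs (pvL lists i) (pvL lists j) := by
  have hlen : (pvOv lists).length = lists.length := by simp [pvOv]
  rw [pvF, PySem.List.pyGetD_eq_getElem _ _ hi0 (by rw [hlen]; exact_mod_cast hi)]
  simp only [pvOv, List.getElem_map]
  rw [PySem.List.pyGetD_eq_getElem _ _ hj0 (by simp; omega)]
  simp only [List.getElem_map]
  rw [count_common_pairs, pvL, pvL,
    PySem.List.pyGetD_eq_getElem _ _ hi0 (by exact_mod_cast hi),
    PySem.List.pyGetD_eq_getElem _ _ hj0 (by exact_mod_cast hj)]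
  simp only [pvNorm_funeq]

lemma pvPick_congr (f g : Int → Int) (xs : List Int) (b : Int)
    (h : ∀ i ∈ b :: xs, f i = g i) :
    xs.foldl (fun c i => if f c < f i then i else c) b
      = xs.foldl (fun c i => if g c < g i then i else c) b := by
  induction xs generalizing b with
  | nil => rfl
  | cons x xs ih =>
    simp only [List.foldl_cons]
    rw [h b (by simp), h x (by simp),
      ih (if g b < g x then x else b) (by
        intro i hi
        rcases List.mem_cons.1 hi with hi | hi
        · subst hi; split_ifs
          · exact h x (by simp)
          · exact h b (by simp)
        · exact h i (by simp [hi]))]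

lemma pvArgmax_fold (f : Int → Int) (xs : List Int) (b : Int) :
    xs.foldl (fun (st : Option Int × Int) idx =>
        if st.2 < f idx then (some idx, f idx) else st) (some b, f b)
      = (some (xs.foldl (fun c i => if f c < f i then i else c) b),
         f (xs.foldl (fun c i => if f c < f i then i else c) b)) := by
  induction xs generalizing b with
  | nil => rfl
  | cons x xs ih =>
    simp only [List.foldl_cons]
    by_cases hfx : f b < f x <;> simp [hfx, ih]

-- the argmax fold over an ascending list picks an element that is maximal and,
-- among the maxima, the smallest index
lemma pvArgmax_spec (f : Int → Int) (xs : List Int) (b : Int)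
    (hpw : (b :: xs).Pairwise (· < ·)) :
    (xs.foldl (fun c i => if f c < f i then i else c) b ∈ b :: xs) ∧
    ∀ i ∈ b :: xs, f i < f (xs.foldl (fun c i => if f c < f i then i else c) b)
      ∨ (f i = f (xs.foldl (fun c i => if f c < f i then i else c) b)
          ∧ xs.foldl (fun c i => if f c < f i then i else c) b ≤ i) := by
  induction xs generalizing b with
  | nil =>
    refine ⟨by simp, ?_⟩
    intro i hi
    rcases List.mem_cons.1 hi with hi | hi
    · subst hi; exact Or.inr ⟨rfl, le_refl _⟩
    · simp at hi
  | cons x xs ih =>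
    rcases List.pairwise_cons.1 hpw with ⟨hb, hx⟩
    have hbx : b < x := hb x (by simp)
    simp only [List.foldl_cons]
    by_cases hf : f b < f x
    · -- the new base is x
      rcases ih x hx with ⟨hmem, hprop⟩
      rw [if_pos hf]
      refine ⟨?_, ?_⟩
      · rcases List.mem_cons.1 hmem with h | h
        · simp [h]
        · simp [h]
      · intro i hi
        rcases List.mem_cons.1 hi with hi | hi
        · subst hi
          rcases hprop x (by simp) with h | h
          · exact Or.inl (by omega)
          · exact Or.inl (by omega)
        · exact hprop i hi
    · -- the new base stays b
      have hpw' : (b :: xs).Pairwise (· < ·) :=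
        List.pairwise_cons.2 ⟨fun a ha => hb a (by simp [ha]), (List.pairwise_cons.1 hx).2⟩
      rcases ih b hpw' with ⟨hmem, hprop⟩
      rw [if_neg hf]
      refine ⟨?_, ?_⟩
      · rcases List.mem_cons.1 hmem with h | h
        · simp [h]
        · simp [h]
      · intro i hi
        rcases List.mem_cons.1 hi with hi | hi
        · subst hi; exact hprop i (by simp)
        · rcases List.mem_cons.1 hi with hi | hi
          · subst hi
            rcases hprop b (by simp) with h | h
            · exact Or.inl (by omega)
            · rcases lt_or_eq_of_le (not_lt.1 hf) with h2 | h2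
              · exact Or.inl (by omega)
              · exact Or.inr ⟨by omega, by omega⟩
          · exact hprop i (by simp [hi])

-- 'first j in row with p j' on a strictly (overlap desc, index asc)-sorted row is that argmax
lemma pvFind_spec (f : Int → Int) (rem : List Int) :
    ∀ (row : List Int),
    row.Pairwise (fun a b => f b < f a ∨ (f a = f b ∧ a < b)) →
    (∀ j ∈ rem, j ∈ row) →
    ∀ (p : Int → Bool), (∀ j ∈ row, (p j = true ↔ j ∈ rem)) →
    ∀ u, row.find? p = some u →
      u ∈ rem ∧ ∀ i ∈ rem, f i < f u ∨ (f i = f u ∧ u ≤ i) := by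
  intro row
  induction row with
  | nil => intro _ _ p _ u h; simp at h
  | cons x row ih =>
    intro hpw hsub p hp u hu
    by_cases hcase : p x = true
    · -- p x = true: u = x
      rw [List.find?_cons_of_pos hcase] at hu
      injection hu with hu
      subst hu
      have hurem : x ∈ rem := (hp x (by simp)).1 hcase
      refine ⟨hurem, ?_⟩
      intro i hi
      by_cases hiu : i = x
      · subst hiu; exact Or.inr ⟨rfl, le_refl _⟩
      · have hirow : i ∈ row := by
          rcases List.mem_cons.1 (hsub i hi) with h | h
          · exact absurd h hiu
          · exact h
        rcases (List.pairwise_cons.1 hpw).1 i hirow with h | h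
        · exact Or.inl h
        · exact Or.inr ⟨h.1.symm, le_of_lt h.2⟩
    · -- p x = false: x ∉ rem, recurse
      rw [List.find?_cons_of_neg hcase] at hu
      have hxnot : x ∉ rem := fun hmem => hcase ((hp x (by simp)).2 hmem)
      refine ih (List.pairwise_cons.1 hpw).2 ?_ p (fun j hj => hp j (by simp [hj])) u hu
      intro j hj
      rcases List.mem_cons.1 (hsub j hj) with h | h
      · subst h; exact absurd hj hxnot
      · exact h

-- the two characterisations pin down the same element
lemma pvArgmaxUnique (f : Int → Int) (rem : List Int) (r u : Int)
    (hr : r ∈ rem ∧ ∀ i ∈ rem, f i < f r ∨ (f i = f r ∧ r ≤ i))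
    (hu : u ∈ rem ∧ ∀ i ∈ rem, f i < f u ∨ (f i = f u ∧ u ≤ i)) : u = r := by
  rcases hr.2 u hu.1 with h1 | h1 <;> rcases hu.2 r hr.1 with h2 | h2 <;> omega

-- decoding the single-integer key j - n*f j back into (f desc, index asc)
lemma pvKey_decode (n : Int) (f : Int → Int) (a b : Int)
    (ha0 : 0 ≤ a) (ha : a < n) (_hb0 : 0 ≤ b) (hb : b < n)
    (h : a - n * f a ≤ b - n * f b) (hne : a ≠ b) :
    f b < f a ∨ (f a = f b ∧ a < b) := by
  rcases lt_trichotomy (f a) (f b) with hf | hf | hf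
  · exfalso
    have h1 : (1 : Int) ≤ f b - f a := by omega
    have hn : (0 : Int) ≤ n := le_trans ha0 (le_of_lt ha)
    have h2 := mul_le_mul_of_nonneg_left h1 hn
    rw [mul_one, mul_sub] at h2
    linarith
  · exact Or.inr ⟨hf, by rw [hf] at h; omega⟩
  · exact Or.inl hf

lemma pvRanked_entry (lists : List (List (Int × Int))) (i : Int)
    (hi0 : 0 ≤ i) (hi : i < (lists.length : Int)) :
    PySem.List.pyGetD (pvRanked lists) i []
      = PySem.List.sorted (PySem.List.pyRange 0 (lists.length : Int))
          (fun j => j - (lists.length : Int) * pvF lists i j) := by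
  have hlen : (pvRanked lists).length = (pvOv lists).length := by simp [pvRanked]
  have hov : (pvOv lists).length = lists.length := by simp [pvOv]
  rw [PySem.List.pyGetD_eq_getElem _ _ hi0 (by rw [hlen, hov]; exact_mod_cast hi)]
  simp only [pvRanked, List.getElem_map]
  congr 1
  funext j
  rw [pvF, PySem.List.pyGetD_eq_getElem _ _ hi0 (by rw [hov]; exact_mod_cast hi)]

lemma pvRanked_pairwise (lists : List (List (Int × Int))) (i : Int)
    (hi0 : 0 ≤ i) (hi : i < (lists.length : Int)) :
    (PySem.List.pyGetD (pvRanked lists) i []).Pairwise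
      (fun a b => pvF lists i b < pvF lists i a ∨ (pvF lists i a = pvF lists i b ∧ a < b)) := by
  rw [pvRanked_entry lists i hi0 hi]
  set key : Int → Int := fun j => j - (lists.length : Int) * pvF lists i j with hkey
  have hperm := PySem.List.sorted_perm (PySem.List.pyRange 0 (lists.length : Int)) key false
  have hnd : (PySem.List.sorted (PySem.List.pyRange 0 (lists.length : Int)) key).Nodup :=
    hperm.nodup_iff.2 (PySem.List.nodup_pyRange_one 0 (lists.length : Int))
  have hle := PySem.List.sorted_pairwise (PySem.List.pyRange 0 (lists.length : Int)) key
  have hboth := hle.and hnd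
  refine hboth.imp_of_mem ?_
  intro a b ha hb hab
  have hamem := PySem.List.mem_pyRange_one.1
    ((PySem.List.mem_sorted _ key false a).1 ha)
  have hbmem := PySem.List.mem_pyRange_one.1
    ((PySem.List.mem_sorted _ key false b).1 hb)
  exact pvKey_decode (lists.length : Int) (pvF lists i) a b
    hamem.1 hamem.2 hbmem.1 hbmem.2 hab.1 hab.2

lemma pvPairSum_append (lists : List (List (Int × Int))) (ch : List Int) (j : Int) (h : ch ≠ []) :
    pvPairSum lists (ch ++ [j])
      = pvPairSum lists ch + count_common_pairs (pvL lists (ch.getLast h)) (pvL lists j) := by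
  induction ch with
  | nil => exact absurd rfl h
  | cons a t ih =>
    cases t with
    | nil => simp [pvPairSum]
    | cons b t' =>
      have hne : b :: t' ≠ [] := by simp
      calc pvPairSum lists ((a :: b :: t') ++ [j])
          = count_common_pairs (pvL lists a) (pvL lists b)
              + pvPairSum lists ((b :: t') ++ [j]) := by simp [pvPairSum]
        _ = _ := by
              rw [ih hne, List.getLast_cons hne]
              simp [pvPairSum]
              ring

lemma pvTot_append (ls : List (List (Int × Int))) (x : List (Int × Int)) (h : ls ≠ []) :
    calculate_total_overlap (ls ++ [x])
      = calculate_total_overlap ls + count_common_pairs (ls.getLast h) x := by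
  have hm : 1 ≤ ls.length := List.length_pos_iff.2 h
  have hlen : ((ls ++ [x]).length : Int) - 1 = ((ls.length : Int) - 1) + 1 := by
    simp
  rw [calculate_total_overlap, hlen,
    PySem.List.pyRange_one_succ_right (by omega),
    List.foldl_append]
  have hcongr : ∀ (acc : Int), ∀ i ∈ PySem.List.pyRange 0 ((ls.length : Int) - 1),
      acc + count_common_pairs (PySem.List.pyGetD (ls ++ [x]) i [])
              (PySem.List.pyGetD (ls ++ [x]) (i + 1) [])
        = acc + count_common_pairs (PySem.List.pyGetD ls i [])
              (PySem.List.pyGetD ls (i + 1) []) := by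
    intro acc i hi
    rcases PySem.List.mem_pyRange_one.1 hi with ⟨hi0, hi1⟩
    have h1 : i < (ls.length : Int) := by omega
    have h2 : i + 1 < (ls.length : Int) := by omega
    rw [PySem.List.pyGetD_eq_getElem _ _ hi0 (by simp; omega),
        PySem.List.pyGetD_eq_getElem _ _ (by omega) (by simp; omega),
        PySem.List.pyGetD_eq_getElem _ _ hi0 (by omega),
        PySem.List.pyGetD_eq_getElem _ _ (by omega : (0:Int) ≤ i + 1) (by omega)]
    rw [List.getElem_append_left (by omega), List.getElem_append_left (by omega)]
  rw [PySem.List.foldl_congr_mem _ _ _ _ hcongr]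
  simp only [List.foldl_cons, List.foldl_nil]
  rw [calculate_total_overlap]
  congr 1
  have hA : (0:Int) ≤ (ls.length : Int) - 1 := by omega
  have e1 : ((ls.length : Int) - 1).toNat = ls.length - 1 := by omega
  have e2 : ((ls.length : Int) - 1 + 1).toNat = ls.length := by omega
  rw [PySem.List.pyGetD_eq_getElem _ _ hA (by simp),
      PySem.List.pyGetD_eq_getElem _ _ (by omega) (by simp),
      List.getLast_eq_getElem h]
  congr 1
  · simp only [e1]
    exact List.getElem_append_left (by omega)
  · simp only [e2]
    exact List.getElem_concat_length rfl _

lemma pvTot_eq (lists : List (List (Int × Int))) (ch : List Int) (h : ch ≠ []) :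
    calculate_total_overlap (ch.map (pvL lists)) = pvPairSum lists ch := by
  induction ch using List.reverseRecOn with
  | nil => exact absurd rfl h
  | append_singleton ch j ih =>
    cases ch with
    | nil =>
      show calculate_total_overlap [pvL lists j] = 0
      rw [calculate_total_overlap]
      norm_num
    | cons a t =>
      have hne : a :: t ≠ [] := by simp
      rw [List.map_append, List.map_singleton,
        pvTot_append _ _ (by simp), ih hne, pvPairSum_append lists _ _ hne]
      congr 2
      rw [List.getLast_eq_getElem, List.getLast_eq_getElem hne]
      simp only [List.length_map]
      exact List.getElem_map _

-- the two inner greedy loops agree step by step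
lemma pvLoop_eq (lists : List (List (Int × Int))) :
    ∀ (count : Nat) (pre : List Int) (last : Int) (rem : List Int) (used : List Bool),
    0 ≤ last → last < (lists.length : Int) →
    rem.Pairwise (· < ·) →
    (∀ i ∈ rem, 0 ≤ i ∧ i < (lists.length : Int)) →
    rem.length = count →
    used.length = lists.length →
    (∀ j : Int, 0 ≤ j → j < (lists.length : Int) →
      (PySem.List.pyGetD used j true = false ↔ j ∈ rem)) →
    pvGreedyA lists (count + 1) ((pre ++ [last]).map (pvL lists)) rem
        = (pvGreedyB (pvOv lists) (pvRanked lists) count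
            (pre ++ [last], last, pvPairSum lists (pre ++ [last]), used)).1.map (pvL lists)
    ∧ (pvGreedyB (pvOv lists) (pvRanked lists) count
        (pre ++ [last], last, pvPairSum lists (pre ++ [last]), used)).2.2.1
        = pvPairSum lists (pvGreedyB (pvOv lists) (pvRanked lists) count
            (pre ++ [last], last, pvPairSum lists (pre ++ [last]), used)).1
    ∧ (pvGreedyB (pvOv lists) (pvRanked lists) count
        (pre ++ [last], last, pvPairSum lists (pre ++ [last]), used)).1 ≠ [] := by
  intro count
  induction count with
  | zero =>
    intro pre last rem used _ _ _ _ hlen _ _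
    have hrem : rem = [] := List.length_eq_zero_iff.1 hlen
    subst hrem
    exact ⟨by simp [pvGreedyA, pvGreedyB], rfl, by simp [pvGreedyB]⟩
  | succ c ih =>
    intro pre last rem used h0 h1 hpw hbnd hlen hul hui
    cases rem with
    | nil => simp at hlen
    | cons x xs =>
      -- the common overlap function of the current node
      set fM : Int → Int := pvF lists last with hfM
      set fA : Int → Int := fun idx => count_common_pairs (pvL lists last) (pvL lists idx) with hfA
      have hfa_fm : ∀ i ∈ x :: xs, fA i = fM i := by
        intro i hi
        rcases hbnd i hi with ⟨hi0, hi1⟩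
        rw [hfA, hfM, pvOv_entry lists last i h0 h1 hi0 hi1]
      -- A's choice
      set r : Int := xs.foldl (fun c i => if fM c < fM i then i else c) x with hr
      have hspecR : r ∈ x :: xs ∧ ∀ i ∈ x :: xs, fM i < fM r ∨ (fM i = fM r ∧ r ≤ i) :=
        pvArgmax_spec fM xs x hpw
      have hrb := hbnd r hspecR.1
      -- result[-1] is lists[last]
      have hcur : PySem.List.pyGetD ((pre ++ [last]).map (pvL lists)) (-1) [] = pvL lists last := by
        rw [show ((-1) : Int) = -((1 : Nat) : Int) by norm_num,
          PySem.List.pyGetD_neg_natCast _ 1 _ (by norm_num) (by simp)]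
        simp only [List.length_map, List.length_append, List.length_cons, List.length_nil,
          Nat.add_sub_cancel]
        simp only [List.getElem_map]
        congr 1
        exact List.getElem_concat_length rfl _
      have hgl : (pre ++ [last]).getLast (by simp) = last := by
        rw [List.getLast_eq_getElem]
        simp only [List.length_append, List.length_cons, List.length_nil, Nat.add_sub_cancel]
        exact List.getElem_concat_length rfl _
      -- A's fold produces (some r, fA r)
      have hfold : (x :: xs).foldl (fun (st : Option Int × Int) idx =>
          if st.2 < fA idx then (some idx, fA idx) else st) (none, -1) = (some r, fA r) := by
        simp only [List.foldl_cons]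
        rw [if_pos (by have := pvCC_nonneg (pvL lists last) (pvL lists x); simp [hfA]; omega)]
        rw [pvArgmax_fold fA xs x]
        rw [show xs.foldl (fun c i => if fA c < fA i then i else c) x = r by
          rw [hr]; exact pvPick_congr fA fM xs x hfa_fm]
      have hstepA : pvGreedyA lists (c + 1 + 1) ((pre ++ [last]).map (pvL lists)) (x :: xs)
          = pvGreedyA lists (c + 1) (((pre ++ [last]) ++ [r]).map (pvL lists)) ((x :: xs).erase r) := by
        rw [pvGreedyA]
        simp only [List.isEmpty_cons, if_false, Bool.false_eq_true]
        rw [hcur]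
        have : ((x :: xs).foldl (fun (st : Option Int × Int) idx =>
            let overlap := count_common_pairs (pvL lists last) (PySem.List.pyGetD lists idx []);
            if st.2 < overlap then (some idx, overlap) else st) (none, -1)) = (some r, fA r) := hfold
        rw [this]
        simp [List.map_append, pvL]
      -- B's choice: first unused entry of the ranking of 'last'
      set row := PySem.List.pyGetD (pvRanked lists) last [] with hrow
      set p : Int → Bool := fun j => !(PySem.List.pyGetD used j true) with hp
      have hrowmem : ∀ j : Int, 0 ≤ j → j < (lists.length : Int) → j ∈ row := by
        intro j hj0 hj1
        rw [hrow, pvRanked_entry lists last h0 h1, PySem.List.mem_sorted]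
        exact PySem.List.mem_pyRange_one.2 ⟨hj0, hj1⟩
      have hpchar : ∀ j ∈ row, (p j = true ↔ j ∈ x :: xs) := by
        intro j hj
        have hjr : 0 ≤ j ∧ j < (lists.length : Int) := by
          have := (PySem.List.mem_sorted _ _ _ j).1 (by
            rw [hrow, pvRanked_entry lists last h0 h1] at hj; exact hj)
          exact PySem.List.mem_pyRange_one.1 this
        rw [hp]
        simp only [Bool.not_eq_true']
        exact hui j hjr.1 hjr.2
      have hfind : row.find? p = some r := by
        have hxrow : x ∈ row := hrowmem x (hbnd x (by simp)).1 (hbnd x (by simp)).2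
        have hsome : (row.find? p).isSome :=
          List.find?_isSome.2 ⟨x, hxrow, (hpchar x hxrow).2 (by simp)⟩
        obtain ⟨u, hu⟩ := Option.isSome_iff_exists.1 hsome
        have hspecU := pvFind_spec fM (x :: xs) row
          (by rw [hrow]; exact pvRanked_pairwise lists last h0 h1)
          (fun j hj => hrowmem j (hbnd j hj).1 (hbnd j hj).2) p hpchar u hu
        rw [hu, pvArgmaxUnique fM (x :: xs) r u hspecR hspecU]
      have hstepB : pvStepB (pvOv lists) (pvRanked lists)
            (pre ++ [last], last, pvPairSum lists (pre ++ [last]), used)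
          = ((pre ++ [last]) ++ [r], r, pvPairSum lists ((pre ++ [last]) ++ [r]),
              PySem.List.pySetD used r true) := by
        rw [pvStepB]
        simp only
        rw [hfind]
        simp only
        congr 1
        rw [pvPairSum_append lists (pre ++ [last]) r (by simp), hgl]
        rw [show PySem.List.pyGetD (PySem.List.pyGetD (pvOv lists) last []) r 0 = fM r from rfl,
          hfM, pvOv_entry lists last r h0 h1 hrb.1 hrb.2]
      -- new invariants for the recursive call
      have hnd : (x :: xs).Nodup := hpw.imp (fun h => ne_of_lt h)
      have hinv' : ∀ j : Int, 0 ≤ j → j < (lists.length : Int) →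
          (PySem.List.pyGetD (PySem.List.pySetD used r true) j true = false
            ↔ j ∈ (x :: xs).erase r) := by
        intro j hj0 hj1
        have hrcast : r = ((r.toNat : Nat) : Int) := by omega
        have hjcast : j = ((j.toNat : Nat) : Int) := by omega
        have hrlen : r.toNat < used.length := by rw [hul]; omega
        rw [hnd.mem_erase_iff]
        rw [hrcast, hjcast, PySem.List.pyGetD_pySetD_natCast used r.toNat j.toNat true true hrlen,
          ← hrcast, ← hjcast]
        by_cases hjr : j.toNat = r.toNat
        · have hjreq : j = r := by omega
          simp [hjreq]
        · have hne : j ≠ r := by omega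
          rw [if_neg hjr, hui j hj0 hj1]
          simp [hne]
      have := ih (pre ++ [last]) r ((x :: xs).erase r) (PySem.List.pySetD used r true)
        hrb.1 hrb.2
        (List.Pairwise.sublist (List.erase_sublist) hpw)
        (fun i hi => hbnd i (List.mem_of_mem_erase hi))
        (by rw [List.length_erase_of_mem hspecR.1]; simpa using hlen)
        (by rw [PySem.List.length_pySetD]; exact hul)
        hinv'
      rw [hstepA]
      simp only [pvGreedyB]
      rw [hstepB]
      exact this

lemma pvFold_rel {α β : Type} (R : α → β → Prop) (fA : α → Int → α) (fB : β → Int → β)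
    (l : List Int) (hstep : ∀ (a : α) (b : β) (s : Int), s ∈ l → R a b → R (fA a s) (fB b s)) :
    ∀ (a : α) (b : β), R a b → R (l.foldl fA a) (l.foldl fB b) := by
  induction l with
  | nil => exact fun a b h => h
  | cons x xs ih =>
    intro a b h
    exact ih (fun a b s hs => hstep a b s (by simp [hs])) _ _
      (hstep a b x (by simp) h)

theorem pvMain (lists : List (List (Int × Int))) :
    sort_by_greedy_best_start lists = sort_by_greedy_best_start_alt lists := by
  by_cases hn : lists.length ≤ 1
  · rw [sort_by_greedy_best_start, sort_by_greedy_best_start_alt]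
    simp [hn]
  · have eA : sort_by_greedy_best_start lists
        = ((PySem.List.pyRange 0 (lists.length : Int)).foldl
            (fun (st : Option (List (List (Int × Int))) × Int) start_idx =>
              let result := pvGreedyA lists lists.length [PySem.List.pyGetD lists start_idx []]
                ((PySem.List.pyRange 0 (lists.length : Int)).erase start_idx)
              let total_overlap := calculate_total_overlap result
              if st.2 < total_overlap then (some result, total_overlap) else st)
            (none, -1)).1.getD [] := by
      rw [sort_by_greedy_best_start, if_neg hn]
    have eB : sort_by_greedy_best_start_alt lists
        = (((PySem.List.pyRange 0 (lists.length : Int)).foldl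
            (fun (st : Option (List Int) × Int) start =>
              let used := PySem.List.pySetD (List.replicate lists.length false) start true
              let res := pvGreedyB (pvOv lists) (pvRanked lists) (lists.length - 1)
                ([start], start, 0, used)
              if st.2 < res.2.2.1 then (some res.1, res.2.2.1) else st)
            (none, -1)).1.getD []).map (pvL lists) := by
      show (if lists.length ≤ 1 then lists else _) = _
      rw [if_neg hn]
      rfl
    rw [eA, eB]
    have hrel := pvFold_rel
      (fun (a : Option (List (List (Int × Int))) × Int) (b : Option (List Int) × Int) =>
        a.1 = b.1.map (fun ch => ch.map (pvL lists)) ∧ a.2 = b.2)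
      (fun (st : Option (List (List (Int × Int))) × Int) start_idx =>
        let result := pvGreedyA lists lists.length [PySem.List.pyGetD lists start_idx []]
          ((PySem.List.pyRange 0 (lists.length : Int)).erase start_idx)
        let total_overlap := calculate_total_overlap result
        if st.2 < total_overlap then (some result, total_overlap) else st)
      (fun (st : Option (List Int) × Int) start =>
        let used := PySem.List.pySetD (List.replicate lists.length false) start true
        let res := pvGreedyB (pvOv lists) (pvRanked lists) (lists.length - 1)
          ([start], start, 0, used)
        if st.2 < res.2.2.1 then (some res.1, res.2.2.1) else st)
      (PySem.List.pyRange 0 (lists.length : Int))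
      (fun a b s hs hR => by
        rcases PySem.List.mem_pyRange_one.1 hs with ⟨hs0, hs1⟩
        set rem := (PySem.List.pyRange 0 (lists.length : Int)).erase s with hremdef
        have hrempw : rem.Pairwise (· < ·) :=
          List.Pairwise.sublist (List.erase_sublist)
            (PySem.List.pairwise_lt_pyRange_one 0 (lists.length : Int))
        have hrembnd : ∀ i ∈ rem, 0 ≤ i ∧ i < (lists.length : Int) :=
          fun i hi => PySem.List.mem_pyRange_one.1 (List.mem_of_mem_erase hi)
        have hsmem : s ∈ PySem.List.pyRange 0 (lists.length : Int) := hs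
        have hremlen : rem.length = lists.length - 1 := by
          rw [hremdef, List.length_erase_of_mem hsmem, PySem.List.length_pyRange_one]
          omega
        have huinv : ∀ j : Int, 0 ≤ j → j < (lists.length : Int) →
            (PySem.List.pyGetD (PySem.List.pySetD (List.replicate lists.length false) s true)
              j true = false ↔ j ∈ rem) := by
          intro j hj0 hj1
          have hscast : s = ((s.toNat : Nat) : Int) := by omega
          have hjcast : j = ((j.toNat : Nat) : Int) := by omega
          have hslen : s.toNat < (List.replicate lists.length false).length := by
            rw [List.length_replicate]; omega
          rw [hremdef, (PySem.List.nodup_pyRange_one 0 (lists.length : Int)).mem_erase_iff]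
          rw [hscast, hjcast,
            PySem.List.pyGetD_pySetD_natCast _ s.toNat j.toNat true true hslen, ← hscast, ← hjcast]
          have hjmem : j ∈ PySem.List.pyRange 0 (lists.length : Int) :=
            PySem.List.mem_pyRange_one.2 ⟨hj0, hj1⟩
          by_cases hjs : j.toNat = s.toNat
          · have hjseq : j = s := by omega
            simp [hjseq]
          · have hne : j ≠ s := by omega
            rw [if_neg hjs,
              PySem.List.pyGetD_eq_getElem _ true hj0 (by rw [List.length_replicate]; omega)]
            simp [hne, hjmem]
        have hloop := pvLoop_eq lists (lists.length - 1) [] s rem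
          (PySem.List.pySetD (List.replicate lists.length false) s true)
          hs0 hs1 hrempw hrembnd hremlen
          (by rw [PySem.List.length_pySetD, List.length_replicate]) huinv
        have hfuel : lists.length - 1 + 1 = lists.length := by omega
        rw [hfuel] at hloop
        have hpre : (([] : List Int) ++ [s]) = [s] := rfl
        rw [hpre] at hloop
        have hps : pvPairSum lists [s] = 0 := rfl
        rw [hps] at hloop
        rcases hloop with ⟨hA, hS, hNe⟩
        have hA' : pvGreedyA lists lists.length [PySem.List.pyGetD lists s []] rem
            = (pvGreedyB (pvOv lists) (pvRanked lists) (lists.length - 1)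
                ([s], s, 0, PySem.List.pySetD (List.replicate lists.length false) s true)).1.map
              (pvL lists) := by
          have : ([s].map (pvL lists)) = [PySem.List.pyGetD lists s []] := by simp [pvL]
          rw [← this]
          exact hA
        dsimp only
        have htot : calculate_total_overlap (pvGreedyA lists lists.length
              [PySem.List.pyGetD lists s []] rem)
            = (pvGreedyB (pvOv lists) (pvRanked lists) (lists.length - 1)
                ([s], s, 0, PySem.List.pySetD (List.replicate lists.length false) s true)).2.2.1 := by
          rw [hA', hS]
          exact pvTot_eq lists _ hNe
        rw [htot, hR.2]
        split_ifs with hc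
        · exact ⟨by rw [hremdef] at hA'; simp [hA'], by simp⟩
        · exact hR)
      (none, -1) (none, -1) ⟨rfl, rfl⟩
    rcases hrel with ⟨h1, h2⟩
    rw [h1]
    cases ((PySem.List.pyRange 0 (lists.length : Int)).foldl _ (none, -1)).1 with
    | none => rfl
    | some ch => rfl

-- ===== VERDICT (by name: the statement is the Claim_ definition above) =====
theorem sort_by_greedy_best_start_spec : Claim_equal_sort_by_greedy_best_start := by
  intro lists _dom
  exact pvMain lists
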